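-- pv_equiv track=rewrite | github.com/Melaniej333/20Questions | game.py | best_question
-- ===== SOURCE A (Python) =====
-- def best_question(objects, questions):
--     """Finds the question that best splits the remaining objects."""
--     best_q = None
--     best_score = -1  # Higher = better split
--
--     for q in questions:
--         # Count how many remaining objects have this trait
--         yes_count = sum(1 for obj in objects.values() if obj.get(q, 0) == 1)
--         no_count = len(objects) - yes_count
--
--         # Skip useless questions (all yes or all no)
--         if yes_count == 0 or no_count == 0:
--             continue
--
--         # Score based on how well it splits AND how many objects it distinguishes
--         score = min(yes_count, no_count)  # Favors balanced splits
--         if score > best_score: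
--             best_score = score
--             best_q = q
--
--     return best_q  # Returns None if no useful questions left
-- ===== SOURCE B (Python) =====
-- def best_question(objects, questions):
--     """Finds the question that best splits the remaining objects."""
--     # Stage 1: one pass over the objects builds yes-counts for every trait.
--     counts = {}
--     for obj in objects.values():
--         for k, v in obj.items():
--             if v == 1:
--                 counts[k] = counts.get(k, 0) + 1
--     n = len(objects)
--     # Stage 2: score every question at once (0 = useless split), then pick
--     # the first position of the maximum score.
--     scores = [min(counts.get(q, 0), n - counts.get(q, 0)) for q in questions]
--     best = max(scores, default=0)
--     if best <= 0:
--         return None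
--     return questions[scores.index(best)]
-- ===== Notes on version B (the rewrite author's own statement) =====
-- stated objective: faster
-- what changed: B builds a trait->yes-count dictionary in one pass over the objects instead of rescanning all objects per question, and replaces A's running-argmax accumulator loop by staged passes: map every question to its score, take max(scores), and return the question at the first index of that maximum.
import Mathlib
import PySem

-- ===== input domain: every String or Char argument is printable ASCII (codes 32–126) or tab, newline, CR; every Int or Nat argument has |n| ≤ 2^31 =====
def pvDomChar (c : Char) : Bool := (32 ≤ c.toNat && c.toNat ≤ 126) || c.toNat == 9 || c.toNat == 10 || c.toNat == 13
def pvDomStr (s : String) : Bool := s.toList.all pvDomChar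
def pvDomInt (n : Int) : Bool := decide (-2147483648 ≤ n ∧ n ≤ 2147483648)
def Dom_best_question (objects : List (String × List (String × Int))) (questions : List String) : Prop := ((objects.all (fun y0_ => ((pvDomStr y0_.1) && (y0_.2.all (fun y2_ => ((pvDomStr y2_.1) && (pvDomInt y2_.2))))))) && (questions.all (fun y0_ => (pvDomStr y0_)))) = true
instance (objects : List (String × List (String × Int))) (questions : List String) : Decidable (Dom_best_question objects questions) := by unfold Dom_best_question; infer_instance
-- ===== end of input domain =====

-- B replaces A's argmax loop with per-question rescans of all objects by three staged
-- passes: one counting pass over the objects building a trait->yes-count dict, a pass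
-- mapping each question to its score, and max+index to pick the winner (objective: faster).

-- ===== PORT A =====
-- yes_count = sum(1 for obj in objects.values() if obj.get(q, 0) == 1)
def pvAYes (objects : List (String × List (String × Int))) (q : String) : Int :=
  objects.foldl (fun acc obj => if (PySem.Dict.mk obj.2).getD q 0 == 1 then acc + 1 else acc) 0

def best_question (objects : List (String × List (String × Int))) (questions : List String) : Option String :=
  (questions.foldl (fun st q =>
      let yes_count := pvAYes objects q
      let no_count := (objects.length : Int) - yes_count
      if yes_count == 0 || no_count == 0 then st
      else
        let score := min yes_count no_count
        if score > st.2 then (some q, score) else st)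
    ((none : Option String), (-1 : Int))).1

-- ===== PORT B =====
-- counts[k] = counts.get(k, 0) + 1 for every trait entry with value 1
def pvBCounts (objects : List (String × List (String × Int))) : PySem.Dict String Int :=
  objects.foldl
    (fun d obj => obj.2.foldl
      (fun d kv => if kv.2 == 1 then d.insert kv.1 (d.getD kv.1 0 + 1) else d) d)
    PySem.Dict.empty

-- scores = [min(counts.get(q, 0), n - counts.get(q, 0)) for q in questions]
def pvBScores (counts : PySem.Dict String Int) (n : Int) (questions : List String) : List Int :=
  questions.map (fun q => min (counts.getD q 0) (n - counts.getD q 0))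

def best_question_alt (objects : List (String × List (String × Int))) (questions : List String) : Option String :=
  let counts := pvBCounts objects
  let n := (objects.length : Int)
  let scores := pvBScores counts n questions
  let best := (PySem.List.max? scores (fun x => x)).getD 0   -- max(scores, default=0)
  if best ≤ 0 then none
  else
    match PySem.List.index? scores best with                 -- questions[scores.index(best)]
    | some i => PySem.List.pyGet? questions (i : Int)
    | none => none  -- unreachable (best ∈ scores); Python's list.index would raise here

-- ===== PRECONDITION & SPEC =====
-- Pre_ excludes association lists with duplicate keys (outer or inner): those do not
-- represent any Python dict input, so neither Python ever receives them.
def Pre_best_question (objects : List (String × List (String × Int))) (questions : List String) : Prop :=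
  (objects.map Prod.fst).Nodup ∧ ∀ o ∈ objects, (o.2.map Prod.fst).Nodup
instance (objects : List (String × List (String × Int))) (questions : List String) : Decidable (Pre_best_question objects questions) := by unfold Pre_best_question; infer_instance

def pvWitness_best_question : (List (String × List (String × Int))) × List String :=
  ([("cat", [("fur", 1), ("wings", 0)]), ("bird", [("fur", 0), ("wings", 1)])], ["fur", "wings"])

def Spec_best_question (objects : List (String × List (String × Int))) (questions : List String) (out : Option String) : Prop := out = best_question_alt objects questions
instance (objects : List (String × List (String × Int))) (questions : List String) (out : Option String) : Decidable (Spec_best_question objects questions out) := by unfold Spec_best_question; infer_instance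

-- ===== CLAIM (what is proved, stated in full; the proofs are below) =====
def Claim_equal_best_question : Prop := ∀ (objects : List (String × List (String × Int))) (questions : List String), Dom_best_question objects questions → Pre_best_question objects questions → Spec_best_question objects questions (best_question objects questions)

-- ===== LEMMAS AND PROOFS =====

-- the inner counting loop leaves a key it never sees untouched
theorem pvInner_notmem (q : String) (l : List (String × Int)) (d : PySem.Dict String Int)
    (h : q ∉ l.map Prod.fst) :
    (l.foldl (fun d kv => if kv.2 == 1 then d.insert kv.1 (d.getD kv.1 0 + 1) else d) d).getD q 0
      = d.getD q 0 := by
  induction l generalizing d with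
  | nil => rfl
  | cons kv rest ih =>
    simp only [List.map_cons, List.mem_cons, not_or] at h
    simp only [List.foldl_cons]
    rw [ih _ h.2]
    split
    · rw [PySem.Dict.getD_insert]
      exact if_neg h.1
    · rfl

-- one object's entries (unique keys) add exactly its 0/1 indicator for q to the counter
theorem pvInner_count (q : String) (l : List (String × Int)) (d : PySem.Dict String Int)
    (h : (l.map Prod.fst).Nodup) :
    (l.foldl (fun d kv => if kv.2 == 1 then d.insert kv.1 (d.getD kv.1 0 + 1) else d) d).getD q 0
      = d.getD q 0 + (if (PySem.Dict.mk l).getD q 0 == 1 then 1 else 0) := by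
  induction l generalizing d with
  | nil => simp [PySem.Dict.getD_eq_get?_getD, PySem.Dict.get?]
  | cons kv rest ih =>
    obtain ⟨k, v⟩ := kv
    simp only [List.map_cons, List.nodup_cons] at h
    simp only [List.foldl_cons]
    rw [PySem.Dict.getD_eq_get?_getD (d := PySem.Dict.mk ((k, v) :: rest)),
        PySem.Dict.get?_mk_cons]
    by_cases hk : k = q
    · subst hk
      rw [pvInner_notmem _ _ _ h.1]
      simp only [BEq.rfl, if_true, Option.getD_some]
      split
      · rw [PySem.Dict.getD_insert_self]
      · omega
    · have hbeq : (k == q) = false := by simp [hk]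
      have hd : (if (v == 1) = true then d.insert k (d.getD k 0 + 1) else d).getD q 0
          = d.getD q 0 := by
        split
        · rw [PySem.Dict.getD_insert]
          exact if_neg (Ne.symm hk)
        · rfl
      rw [hbeq, ih _ h.2, hd]
      simp only [Bool.false_eq_true, if_false, ← PySem.Dict.getD_eq_get?_getD]

-- the whole counting pass adds A's yes-count for q
theorem pvOuter (q : String) (objects : List (String × List (String × Int)))
    (d : PySem.Dict String Int) (h : ∀ o ∈ objects, (o.2.map Prod.fst).Nodup) :
    (objects.foldl
        (fun d obj => obj.2.foldl
          (fun d kv => if kv.2 == 1 then d.insert kv.1 (d.getD kv.1 0 + 1) else d) d) d).getD q 0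
      = d.getD q 0 + (objects.countP (fun obj => (PySem.Dict.mk obj.2).getD q 0 == 1) : Int) := by
  induction objects generalizing d with
  | nil => simp
  | cons o rest ih =>
    simp only [List.foldl_cons, List.countP_cons]
    rw [ih _ (fun o ho => h o (List.mem_cons_of_mem _ ho))]
    rw [pvInner_count _ _ _ (h o (List.mem_cons_self ..))]
    split <;> push_cast <;> omega

-- the counter's entry for q is A's yes-count over the objects
theorem pvCounts_eq (objects : List (String × List (String × Int))) (q : String)
    (h : ∀ o ∈ objects, (o.2.map Prod.fst).Nodup) :
    (pvBCounts objects).getD q 0 = pvAYes objects q := by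
  unfold pvBCounts pvAYes
  rw [PySem.List.foldl_if_add_one, pvOuter q objects _ h, PySem.Dict.getD_empty]

-- A's yes-count is a countP, hence between 0 and len(objects)
theorem pvAYes_bounds (objects : List (String × List (String × Int))) (q : String) :
    0 ≤ pvAYes objects q ∧ pvAYes objects q ≤ (objects.length : Int) := by
  unfold pvAYes
  rw [PySem.List.foldl_if_add_one]
  have h := List.countP_le_length
    (p := fun obj : String × List (String × Int) => (PySem.Dict.mk obj.2).getD q 0 == 1)
    (l := objects)
  omega

-- start-0 running max of scores over a question list
def pvN (f : String → Int) (qs : List String) : Int :=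
  qs.foldl (fun a q => max a (f q)) 0

theorem pvFoldl_max_shift (f : String → Int) (qs : List String) (a : Int) (ha : 0 ≤ a) :
    qs.foldl (fun x q => max x (f q)) a = max a (pvN f qs) := by
  induction qs generalizing a with
  | nil => simp only [List.foldl_nil, pvN]; omega
  | cons q rest ih =>
    simp only [List.foldl_cons, pvN]
    rw [ih _ (le_trans ha (le_max_left _ _)),
        show rest.foldl (fun x r => max x (f r)) (max 0 (f q))
           = max (max 0 (f q)) (pvN f rest) from ih _ (le_max_left _ _)]
    omega

theorem pvN_nonneg (f : String → Int) (qs : List String) : 0 ≤ pvN f qs := by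
  cases qs with
  | nil => simp [pvN]
  | cons q rest =>
    have h := pvFoldl_max_shift f rest (max 0 (f q)) (le_max_left _ _)
    simp only [pvN, List.foldl_cons] at *
    omega

theorem pvN_cons (f : String → Int) (q : String) (qs : List String) :
    pvN f (q :: qs) = max (f q) (pvN f qs) := by
  have h := pvFoldl_max_shift f qs (max 0 (f q)) (le_max_left _ _)
  have hn := pvN_nonneg f qs
  simp only [pvN, List.foldl_cons] at *
  omega

-- characterisation of A's argmax loop: first question attaining the running max wins
theorem pvLoop_char (f : String → Int) (hf : ∀ q, 0 ≤ f q) (qs : List String)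
    (o : Option String) (b : Int) :
    qs.foldl (fun st q => if f q ≤ 0 then st
                          else if st.2 < f q then (some q, f q) else st) (o, b)
      = if max b 0 < pvN f qs then (qs.find? (fun q => f q == pvN f qs), pvN f qs) else (o, b) := by
  induction qs generalizing o b with
  | nil =>
    simp only [List.foldl_nil, pvN]
    rw [if_neg (by omega)]
  | cons q rest ih =>
    have hb := pvN_nonneg f rest
    have hq := hf q
    simp only [List.foldl_cons, pvN_cons]
    by_cases h0 : f q ≤ 0
    · have hfq : f q = 0 := le_antisymm h0 hq
      rw [if_pos h0, ih o b]
      by_cases hc : max b 0 < pvN f rest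
      · have hne : ¬ ((f q == pvN f rest) = true) := by
          simp only [beq_iff_eq]; omega
        rw [if_pos hc, if_pos (show max b 0 < max (f q) (pvN f rest) by omega),
            show max (f q) (pvN f rest) = pvN f rest by omega,
            List.find?_cons_of_neg (p := fun r => f r == pvN f rest) (a := q) (l := rest) hne]
      · rw [if_neg hc, if_neg (show ¬ max b 0 < max (f q) (pvN f rest) by omega)]
    · rw [if_neg h0]
      by_cases h1 : b < f q
      · rw [if_pos h1, ih (some q) (f q),
            show max (f q) 0 = f q by omega,
            if_pos (show max b 0 < max (f q) (pvN f rest) by omega)]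
        by_cases h2 : f q < pvN f rest
        · have hne : ¬ ((f q == pvN f rest) = true) := by
            simp only [beq_iff_eq]; omega
          rw [if_pos h2, show max (f q) (pvN f rest) = pvN f rest by omega,
              List.find?_cons_of_neg (p := fun r => f r == pvN f rest) (a := q) (l := rest) hne]
        · rw [if_neg h2, show max (f q) (pvN f rest) = f q by omega,
              List.find?_cons_of_pos (by simp)]
      · rw [if_neg h1, ih o b]
        by_cases hc : b < pvN f rest
        · have hne : ¬ ((f q == pvN f rest) = true) := by
            simp only [beq_iff_eq]; omega
          rw [if_pos (show max b 0 < pvN f rest by omega),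
              if_pos (show max b 0 < max (f q) (pvN f rest) by omega),
              show max (f q) (pvN f rest) = pvN f rest by omega,
              List.find?_cons_of_neg (p := fun r => f r == pvN f rest) (a := q) (l := rest) hne]
        · rw [if_neg (show ¬ max b 0 < pvN f rest by omega),
              if_neg (show ¬ max b 0 < max (f q) (pvN f rest) by omega)]

-- B's index?-then-subscript over the mapped scores is find? over the questions
theorem pvIndex_pyGet (f : String → Int) (qs : List String) (v : Int) :
    (match PySem.List.index? (qs.map f) v with
     | some i => PySem.List.pyGet? qs (i : Int)
     | none => none)
      = qs.find? (fun q => f q == v) := by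
  induction qs with
  | nil => simp [PySem.List.index?]
  | cons q rest ih =>
    simp only [List.map_cons]
    by_cases h : f q = v
    · subst h
      rw [PySem.List.index?_cons_self, List.find?_cons_of_pos (by simp)]
      simp
    · rw [PySem.List.index?_cons_of_ne (List.map f rest) h,
          List.find?_cons_of_neg (by simpa using h), ← ih]
      cases hidx : PySem.List.index? (rest.map f) v with
      | none => simp
      | some i =>
        simp only [Option.map_some]
        rw [show ((i + 1 : Nat) : Int) = (i : Int) + 1 by push_cast; ring,
            PySem.List.pyGet?_cons_succ]

-- B's max(scores, default=0) is the running max pvN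
theorem pvBest_eq (f : String → Int) (hf : ∀ q, 0 ≤ f q) (qs : List String) :
    (PySem.List.max? (qs.map f) (fun x => x)).getD 0 = pvN f qs := by
  cases qs with
  | nil => simp [PySem.List.max?, pvN]
  | cons q rest =>
    rw [List.map_cons, PySem.List.max?_id_cons]
    simp only [Option.getD_some]
    rw [List.foldl_map, pvFoldl_max_shift f rest (f q) (hf q), pvN_cons]

-- ===== VERDICT (by name: the statement is the Claim_ definition above) =====
theorem best_question_spec : Claim_equal_best_question := by
  intro objects questions _ hpre
  unfold Spec_best_question best_question best_question_alt
  set n : Int := (objects.length : Int) with hn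
  set f : String → Int := fun q => min (pvAYes objects q) (n - pvAYes objects q) with hfdef
  have hf : ∀ q, 0 ≤ f q := by
    intro q
    have := pvAYes_bounds objects q
    simp only [hfdef]; omega
  -- A's loop body is the canonical step for f
  have hA : (questions.foldl (fun st q =>
      let yes_count := pvAYes objects q
      let no_count := n - yes_count
      if yes_count == 0 || no_count == 0 then st
      else
        let score := min yes_count no_count
        if score > st.2 then (some q, score) else st)
    ((none : Option String), (-1 : Int)))
      = questions.foldl (fun st q => if f q ≤ 0 then st
          else if st.2 < f q then (some q, f q) else st) ((none : Option String), (-1 : Int)) := by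
    apply PySem.List.foldl_congr_mem
    intro st q _
    have hb := pvAYes_bounds objects q
    simp only [hfdef, beq_iff_eq, Bool.or_eq_true, gt_iff_lt]
    exact if_congr (by omega) rfl rfl
  rw [hA, pvLoop_char f hf]
  -- B's scores are questions.map f
  have hscores : pvBScores (pvBCounts objects) n questions = questions.map f := by
    unfold pvBScores
    apply List.map_congr_left
    intro q _
    rw [pvCounts_eq objects q hpre.2, hfdef]
  simp only [hscores, pvBest_eq f hf questions, pvIndex_pyGet f questions (pvN f questions)]
  have hnn := pvN_nonneg f questions
  by_cases hpos : 0 < pvN f questions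
  · rw [if_pos (by omega), if_neg (by omega)]
  · rw [if_neg (by omega), if_pos (by omega)]
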